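-- pv_equiv track=rewrite | github.com/neaGaze/CodingPractice | AmazonQuestions/AmazonFreshPromotion.py | fresh_promotion
-- ===== SOURCE A (Python) =====
-- def fresh_promotion(codelist, shopping_cart):
--     codelist
--     i, j = 0, 0
--     while len(codelist) > 0 and i < len(shopping_cart):
--         if codelist[0][0] == shopping_cart[i] or codelist[0][0] == "anything":
--             m = 0
--             j = i
--             while m < len(codelist[0]) and (codelist[0][m] == shopping_cart[j] or codelist[0][m] == "anything"):
--                 j += 1
--                 m += 1
--
--             if m == len(codelist[0]):
--                 codelist.pop(0)
--                 i = j
--             else: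
--                 i += 1
--         else:
--             i += 1
--
--     return 1 if len(codelist) == 0 else 0
-- ===== SOURCE B (Python) =====
-- def fresh_promotion(codelist, shopping_cart):
--     # NOTE: unlike A, this does not mutate codelist; the equivalence claimed is about the return value.
--     n = len(shopping_cart)
--
--     def search(groups, pos, need):
--         # need = total length of the remaining groups: early infeasibility exit
--         if not groups:
--             return 1
--         if need > n - pos:
--             return 0
--         g = groups[0]
--         k = len(g)
--         for p in range(pos, n - k + 1):
--             if all(c == x or c == "anything" for c, x in zip(g, shopping_cart[p:p + k])):
--                 return search(groups[1:], p + k, need - k)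
--         return 0
--
--     return search(codelist, 0, sum(len(g) for g in codelist))
-- ===== Notes on version B (the rewrite author's own statement) =====
-- stated objective: alternative
-- what changed: A restart-scans with an imperative index/pop loop that double-checks the first element and can run past the cart's end; B is a non-mutating recursive greedy search per group with the scan window capped at n-len(group) and an early infeasibility exit; …
-- outside the precondition, e.g. on fresh_promotion([[]], []): A returns 0, B returns 1; on fresh_promotion([['a'], []], ['a']): A returns 0, B returns 1
import Mathlib
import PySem

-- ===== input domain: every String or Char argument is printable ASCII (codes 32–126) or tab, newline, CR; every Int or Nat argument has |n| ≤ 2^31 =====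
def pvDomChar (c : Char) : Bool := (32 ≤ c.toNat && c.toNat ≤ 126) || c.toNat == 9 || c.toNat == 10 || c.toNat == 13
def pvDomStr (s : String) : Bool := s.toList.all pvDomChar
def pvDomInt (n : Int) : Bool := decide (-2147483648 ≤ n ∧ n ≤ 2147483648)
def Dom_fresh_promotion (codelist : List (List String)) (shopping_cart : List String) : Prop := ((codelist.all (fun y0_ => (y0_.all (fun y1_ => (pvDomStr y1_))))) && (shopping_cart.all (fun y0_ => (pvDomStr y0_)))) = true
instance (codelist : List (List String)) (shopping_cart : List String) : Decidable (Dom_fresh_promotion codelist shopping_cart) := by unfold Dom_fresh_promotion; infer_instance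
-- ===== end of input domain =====

-- B replaces A's imperative restart/pop scan by a non-mutating recursive greedy search per group with a
-- capped scan window and an early infeasibility exit; A pops from codelist in place, B does not mutate it
-- (the equivalence proved here is about the return value).

-- ===== PORT A =====
-- shared one-liner for Python's 'c == x or c == "anything"' test (both sources use this very test)
def pvWB (c x : String) : Bool := c == x || c == "anything"

-- inner while loop of A: j, m counters; returns the final m (j = start + m throughout)
def pvInnerA (g cart : List String) (j m : Nat) : Nat :=
  if h : m < g.length then
    match cart[j]? with
    | some x => if pvWB g[m] x then pvInnerA g cart (j + 1) (m + 1) else m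
    | none => m   -- Python raises IndexError reading shopping_cart[j] here; excluded by Pre_
  else m
termination_by g.length - m

-- outer while loop of A: first argument is the (popped-down) codelist, i the cart index
def pvLoopA : List (List String) → List String → Nat → Int
  | [], _, _ => 1
  | g :: rest, cart, i =>
    if hi : i < cart.length then
      match g with
      | [] => 0   -- Python raises IndexError at codelist[0][0]; excluded by Pre_
      | c0 :: gt =>
        if pvWB c0 cart[i] then
          if hm : pvInnerA (c0 :: gt) cart i 0 = (c0 :: gt).length then
            pvLoopA rest cart (i + pvInnerA (c0 :: gt) cart i 0)
          else pvLoopA ((c0 :: gt) :: rest) cart (i + 1)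
        else pvLoopA ((c0 :: gt) :: rest) cart (i + 1)
    else 0
termination_by _gs cart i => cart.length - i
decreasing_by
  · simp only [List.length_cons] at hm; omega
  · omega
  · omega

def fresh_promotion (codelist : List (List String)) (shopping_cart : List String) : Int :=
  pvLoopA codelist shopping_cart 0

-- ===== PORT B =====
-- does group g wildcard-match the cart segment starting at p? (Source B's zip/all test)
def pvMatchAt (g cart : List String) (p : Nat) : Bool :=
  (g.zip (PySem.List.slice cart (some (p : Int)) (some ((p : Int) + (g.length : Int))))).all
    (fun cx => pvWB cx.1 cx.2)

-- Source B's 'for p in range(pos, n - k + 1): … return …' search: first match position, if any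
def pvFind (g cart : List String) (p : Nat) : Option Nat :=
  if h : p + g.length ≤ cart.length then
    if pvMatchAt g cart p then some p else pvFind g cart (p + 1)
  else none
termination_by cart.length + 1 - p
decreasing_by omega

-- Source B's recursive search; need = total length of the remaining groups
def pvSearch (cart : List String) : List (List String) → Nat → Nat → Int
  | [], _, _ => 1
  | g :: rest, pos, need =>
    if (need : Int) > (cart.length : Int) - (pos : Int) then 0
    else
      match pvFind g cart pos with
      | some p => pvSearch cart rest (p + g.length) (need - g.length)
      | none => 0

def fresh_promotion_alt (codelist : List (List String)) (shopping_cart : List String) : Int :=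
  pvSearch shopping_cart codelist 0 ((codelist.map List.length).sum)

-- ===== PRECONDITION & SPEC =====
-- Boolean match predicates used by Pre_ (over the raw input; they do not reach either port):
-- group g wildcard-matches the full segment of length g.length starting at q
def pvFullB (g cart : List String) (q : Nat) : Bool :=
  decide (q + g.length ≤ cart.length) && (g.zip (cart.drop q)).all (fun cx => pvWB cx.1 cx.2)
-- group g wildcard-matches the cart from position p up to the very end, with part of g left over:
-- A's inner loop then reads shopping_cart[len(shopping_cart)] and raises IndexError
def pvRunB (g cart : List String) (p : Nat) : Bool :=
  decide (cart.length < p + g.length) && (g.zip (cart.drop p)).all (fun cx => pvWB cx.1 cx.2)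
-- p is the FIRST position ≥ s where g fully matches (where A pops the group and resumes)
def pvFirstFullB (g cart : List String) (s p : Nat) : Bool :=
  decide (s ≤ p) && pvFullB g cart p &&
    (List.range p).all (fun q => !(decide (s ≤ q) && pvFullB g cart q))
-- A is safe from start position s: an empty group may only be reached at the very end of the cart and
-- only with a nonempty group still behind it (mid-cart A raises; at the end with only empty groups left
-- A's 0 and B's vacuous-match 1 are both defensible, so that corner is excluded); for a nonempty group,
-- every overrun position reachable before a full match is preceded by a full match (so the scan stops
-- first), and from the resume position of the (unique) first full match the remaining groups are safe
def pvSafe (cart : List String) : List (List String) → Nat → Bool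
  | [], _ => true
  | [] :: rest, s => decide (cart.length ≤ s) && rest.any (fun g => !g.isEmpty)
  | (c0 :: gt) :: rest, s =>
    let g := c0 :: gt
    ((List.range cart.length).all fun p =>
       !(decide (s ≤ p) && pvRunB g cart p) ||
       ((List.range p).any fun q => decide (s ≤ q) && pvFullB g cart q)) &&
    ((List.range (cart.length + 1)).all fun p =>
       !(pvFirstFullB g cart s p) || pvSafe cart rest (p + g.length))

-- Pre_ excludes exactly the inputs on which A raises IndexError (a wildcard/equality match running past
-- the cart's end with no earlier full match along A's scan, or an empty code group reached with cart
-- positions left), plus the one corner where an empty code group is reached exactly at the cart's end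
-- with only empty groups behind it: there A returns 0 while B's vacuous-match 1 is equally defensible.
def Pre_fresh_promotion (codelist : List (List String)) (shopping_cart : List String) : Prop :=
  pvSafe shopping_cart codelist 0 = true
instance (codelist : List (List String)) (shopping_cart : List String) : Decidable (Pre_fresh_promotion codelist shopping_cart) := by unfold Pre_fresh_promotion; infer_instance

def pvWitness_fresh_promotion : List (List String) × List String := ([["a"], ["b"]], ["a", "c", "b"])

def Spec_fresh_promotion (codelist : List (List String)) (shopping_cart : List String) (out : Int) : Prop := out = fresh_promotion_alt codelist shopping_cart
instance (codelist : List (List String)) (shopping_cart : List String) (out : Int) : Decidable (Spec_fresh_promotion codelist shopping_cart out) := by unfold Spec_fresh_promotion; infer_instance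

-- ===== CLAIM (what is proved, stated in full; the proofs are below) =====
def Claim_equal_fresh_promotion : Prop := ∀ (codelist : List (List String)) (shopping_cart : List String), Dom_fresh_promotion codelist shopping_cart → Pre_fresh_promotion codelist shopping_cart → Spec_fresh_promotion codelist shopping_cart (fresh_promotion codelist shopping_cart)

-- ===== LEMMAS AND PROOFS =====

-- Prop twins of the Boolean predicates, used by the scan lemma
def pvRun (g cart : List String) (p : Nat) : Prop :=
  cart.length < p + g.length ∧ (g.zip (cart.drop p)).all (fun cx => pvWB cx.1 cx.2) = true
def pvFull (g cart : List String) (q : Nat) : Prop :=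
  q + g.length ≤ cart.length ∧ (g.zip (cart.drop q)).all (fun cx => pvWB cx.1 cx.2) = true

lemma pvFullB_iff (g cart : List String) (q : Nat) : pvFullB g cart q = true ↔ pvFull g cart q := by
  simp [pvFullB, pvFull]

lemma pvRunB_iff (g cart : List String) (p : Nat) : pvRunB g cart p = true ↔ pvRun g cart p := by
  simp [pvRunB, pvRun]

lemma zip_all_iff {α β : Type} (f : α × β → Bool) (l₁ : List α) (l₂ : List β) :
    ((l₁.zip l₂).all f = true ↔
      ∀ t (h1 : t < l₁.length) (h2 : t < l₂.length), f (l₁[t], l₂[t]) = true) := by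
  rw [List.all_eq_true]
  constructor
  · intro h t h1 h2
    have hm : t < (l₁.zip l₂).length := by simp [List.length_zip]; omega
    have := h ((l₁.zip l₂)[t]) (List.getElem_mem hm)
    simpa [List.getElem_zip] using this
  · intro h x hx
    obtain ⟨t, ht, rfl⟩ := List.mem_iff_getElem.mp hx
    have ht' : t < l₁.length ∧ t < l₂.length := by
      simpa [List.length_zip] using ht
    simpa [List.getElem_zip] using h t ht'.1 ht'.2

lemma inner_spec (g cart : List String) (i : Nat) :
    ∀ d m, g.length - m ≤ d → m ≤ g.length →
      m ≤ pvInnerA g cart (i + m) m ∧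
      pvInnerA g cart (i + m) m ≤ g.length ∧
      (∀ t, m ≤ t → t < pvInnerA g cart (i + m) m →
        ∃ c x, g[t]? = some c ∧ cart[i + t]? = some x ∧ pvWB c x = true) ∧
      (pvInnerA g cart (i + m) m < g.length →
        cart[i + pvInnerA g cart (i + m) m]? = none ∨
        ∃ c x, g[pvInnerA g cart (i + m) m]? = some c ∧
          cart[i + pvInnerA g cart (i + m) m]? = some x ∧ pvWB c x = false) := by
  intro d
  induction d with
  | zero =>
    intro m hd hm
    have hnl : ¬ m < g.length := by omega
    have heq : pvInnerA g cart (i + m) m = m := by rw [pvInnerA]; simp [hnl]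
    rw [heq]
    exact ⟨le_refl m, hm, fun t h1 h2 => absurd (lt_of_le_of_lt h1 h2) (lt_irrefl m), fun h => absurd h hnl⟩
  | succ d ih =>
    intro m hd hm
    by_cases h : m < g.length
    · rcases hc : cart[i + m]? with _ | x
      · have heq : pvInnerA g cart (i + m) m = m := by rw [pvInnerA]; simp [h, hc]
        rw [heq]
        exact ⟨le_refl m, by omega, fun t h1 h2 => absurd (lt_of_le_of_lt h1 h2) (lt_irrefl m),
          fun _ => Or.inl hc⟩
      · by_cases hw : pvWB g[m] x = true
        · have heq : pvInnerA g cart (i + m) m = pvInnerA g cart (i + (m + 1)) (m + 1) := by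
            rw [pvInnerA]; simp [h, hc, hw]; rfl
          rw [heq]
          obtain ⟨h1, h2, h3, h4⟩ := ih (m + 1) (by omega) (by omega)
          refine ⟨by omega, h2, ?_, h4⟩
          intro t hmt htr
          rcases Nat.eq_or_lt_of_le hmt with rfl | hlt
          · exact ⟨g[m], x, by simp [List.getElem?_eq_getElem h], hc, hw⟩
          · exact h3 t (by omega) htr
        · have hw' : pvWB g[m] x = false := by simpa using hw
          have heq : pvInnerA g cart (i + m) m = m := by rw [pvInnerA]; simp [h, hc, hw']
          rw [heq]
          exact ⟨le_refl m, by omega, fun t h1 h2 => absurd (lt_of_le_of_lt h1 h2) (lt_irrefl m),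
            fun _ => Or.inr ⟨g[m], x, by simp [List.getElem?_eq_getElem h], hc, hw'⟩⟩
    · have heq : pvInnerA g cart (i + m) m = m := by rw [pvInnerA]; simp [h]
      rw [heq]
      exact ⟨le_refl m, hm, fun t h1 h2 => absurd (lt_of_le_of_lt h1 h2) (lt_irrefl m), fun hh => absurd hh h⟩

lemma pvFind_some (g cart : List String) :
    ∀ d p q, cart.length + 1 - p ≤ d → pvFind g cart p = some q →
      p ≤ q ∧ q + g.length ≤ cart.length := by
  intro d
  induction d with
  | zero => intro p q hd hf; rw [pvFind] at hf; split at hf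
            · omega
            · exact absurd hf (by simp)
  | succ d ih =>
    intro p q hd hf
    rw [pvFind] at hf
    split at hf
    · rename_i h
      split at hf
      · cases hf; omega
      · have := ih (p + 1) q (by omega) hf
        omega
    · exact absurd hf (by simp)

lemma pvFind_none_of_big (g cart : List String) (p : Nat)
    (h : cart.length < p + g.length) : pvFind g cart p = none := by
  rw [pvFind]; simp [Nat.not_le.mpr h]

lemma pvFind_some_match (g cart : List String) :
    ∀ d p q, cart.length + 1 - p ≤ d → pvFind g cart p = some q → pvMatchAt g cart q = true := by
  intro d
  induction d with
  | zero => intro p q hd hf; rw [pvFind] at hf; split at hf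
            · omega
            · exact absurd hf (by simp)
  | succ d ih =>
    intro p q hd hf
    rw [pvFind] at hf
    split at hf
    · split at hf
      · cases hf; assumption
      · exact ih (p + 1) q (by omega) hf
    · exact absurd hf (by simp)

lemma matchAt_iff_all (g cart : List String) (p : Nat) (_hpk : p + g.length ≤ cart.length) :
    pvMatchAt g cart p = true ↔
      (g.zip (cart.drop p)).all (fun cx => pvWB cx.1 cx.2) = true := by
  unfold pvMatchAt
  rw [PySem.List.slice_natCast_add, zip_all_iff, zip_all_iff]
  constructor
  · intro hh t h1 h2
    have h2' : t < ((cart.drop p).take g.length).length := by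
      simp only [List.length_take, List.length_drop, lt_min_iff]
      simp only [List.length_drop] at h2
      omega
    have := hh t h1 h2'
    simpa [List.getElem_take, List.getElem_drop] using this
  · intro hh t h1 h2
    have h2' : t < (cart.drop p).length := by
      simp only [List.length_take, List.length_drop, lt_min_iff] at h2
      simp only [List.length_drop]
      omega
    have := hh t h1 h2'
    simpa [List.getElem_take, List.getElem_drop] using this

lemma pvFind_some_fullB (g cart : List String) (s p : Nat) (hf : pvFind g cart s = some p) :
    s ≤ p ∧ pvFullB g cart p = true := by
  obtain ⟨h1, h2⟩ := pvFind_some g cart (cart.length + 1) s p (by omega) hf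
  have hm := pvFind_some_match g cart (cart.length + 1) s p (by omega) hf
  exact ⟨h1, (pvFullB_iff g cart p).mpr ⟨h2, (matchAt_iff_all g cart p h2).mp hm⟩⟩

lemma pvFind_min (g cart : List String) :
    ∀ d s p, cart.length + 1 - s ≤ d → pvFind g cart s = some p →
      ∀ q, s ≤ q → q < p → pvFullB g cart q = false := by
  intro d
  induction d with
  | zero => intro s p hd hf; rw [pvFind] at hf; split at hf
            · omega
            · exact absurd hf (by simp)
  | succ d ih =>
    intro s p hd hf q hsq hqp
    rw [pvFind] at hf
    split at hf
    · rename_i hbound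
      split at hf
      · rename_i hmt
        cases hf; omega
      · rename_i hmt
        rcases Nat.eq_or_lt_of_le hsq with rfl | hlt
        · rw [pvFullB]
          simp only [Bool.and_eq_false_iff]
          right
          rcases hz : (g.zip (cart.drop s)).all (fun cx => pvWB cx.1 cx.2) with _ | _
          · rfl
          · exact absurd ((matchAt_iff_all g cart s hbound).mpr hz) hmt
        · exact ih (s + 1) p (by omega) hf q (by omega) hqp
    · exact absurd hf (by simp)

lemma pvFind_firstFullB (g cart : List String) (s p : Nat) (hf : pvFind g cart s = some p) :
    pvFirstFullB g cart s p = true := by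
  obtain ⟨hsp, hfull⟩ := pvFind_some_fullB g cart s p hf
  rw [pvFirstFullB]
  simp only [Bool.and_eq_true, decide_eq_true_eq, List.all_eq_true, List.mem_range]
  refine ⟨⟨hsp, hfull⟩, ?_⟩
  intro q hqp
  by_cases hsq : s ≤ q
  · simp [pvFind_min g cart (cart.length + 1) s p (by omega) hf q hsq hqp]
  · simp [hsq]

/-- A's scan for the first group, from position `i`, equals B's `pvFind` followed by the rest,
    provided every wildcard run reachable from `i` is preceded by a full match (so A never raises). -/
lemma scan_eq (cart : List String) (c0 : String) (gt : List String) (rest : List (List String)) :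
    ∀ d i, cart.length - i ≤ d →
      (∀ p, i ≤ p → p < cart.length → pvRun (c0 :: gt) cart p →
        ∃ q, i ≤ q ∧ q < p ∧ pvFull (c0 :: gt) cart q) →
      pvLoopA ((c0 :: gt) :: rest) cart i =
        (match pvFind (c0 :: gt) cart i with
          | some p => pvLoopA rest cart (p + (c0 :: gt).length)
          | none => 0) := by
  intro d
  induction d with
  | zero =>
    intro i hd _
    have hni : ¬ i < cart.length := by omega
    have hL : pvLoopA ((c0 :: gt) :: rest) cart i = 0 := by rw [pvLoopA]; simp [hni]
    have hF : pvFind (c0 :: gt) cart i = none := pvFind_none_of_big _ _ _ (by simp; omega)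
    rw [hL, hF]
  | succ d ih =>
    intro i hd hrun
    by_cases hi : i < cart.length
    swap
    · have hL : pvLoopA ((c0 :: gt) :: rest) cart i = 0 := by rw [pvLoopA]; simp [hi]
      have hF : pvFind (c0 :: gt) cart i = none := pvFind_none_of_big _ _ _ (by simp; omega)
      rw [hL, hF]
    obtain ⟨hr1, hr2, hr3, hr4⟩ := inner_spec (c0 :: gt) cart i ((c0 :: gt).length) 0 (by omega) (by omega)
    simp only [Nat.add_zero] at hr1 hr2 hr3 hr4
    by_cases hb : pvWB c0 cart[i] = true
    · by_cases hfull : pvInnerA (c0 :: gt) cart i 0 = (c0 :: gt).length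
      · -- full match at i
        rw [hfull] at hr3
        have hik : i + (c0 :: gt).length ≤ cart.length := by
          obtain ⟨c, x, _, hcx, _⟩ := hr3 ((c0 :: gt).length - 1) (by omega) (by simp)
          have := (List.getElem?_eq_some_iff.mp hcx).1
          simp only [List.length_cons] at *
          omega
        have hmt : pvMatchAt (c0 :: gt) cart i = true := by
          unfold pvMatchAt
          rw [PySem.List.slice_natCast_add, zip_all_iff]
          intro t h1 h2
          obtain ⟨c, x, hgc, hcx, hwt⟩ := hr3 t (Nat.zero_le t) h1
          rw [List.getElem?_eq_getElem h1] at hgc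
          have h2' : i + t < cart.length := by
            simp only [List.length_take, List.length_drop, lt_min_iff] at h2
            omega
          rw [List.getElem?_eq_getElem h2'] at hcx
          have hst : ((cart.drop i).take (c0 :: gt).length)[t] = cart[i + t] := by
            simp [List.getElem_take, List.getElem_drop]
          simp only [hst]
          cases hgc; cases hcx
          exact hwt
        have hfind : pvFind (c0 :: gt) cart i = some i := by
          simp only [List.length_cons] at hik; rw [pvFind]; simp [hik, hmt]
        have hL : pvLoopA ((c0 :: gt) :: rest) cart i =
            pvLoopA rest cart (i + pvInnerA (c0 :: gt) cart i 0) := by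
          simp only [List.length_cons] at hfull; rw [pvLoopA]; simp [hi, hb, hfull]
        rw [hL, hfind, hfull]
      · -- r < length: no full match at i
        have hrlt : pvInnerA (c0 :: gt) cart i 0 < (c0 :: gt).length :=
          lt_of_le_of_ne hr2 hfull
        -- position i is not a full match of the group
        have hnotfull : ¬ pvFull (c0 :: gt) cart i := by
          rintro ⟨hbound, hall⟩
          rw [zip_all_iff] at hall
          rcases hr4 hrlt with hnone | ⟨c, x, hgc, hcx, hwf⟩
          · -- the inner loop ran off the cart: a run at i, killed by hrun
            have hrn : cart.length ≤ i + pvInnerA (c0 :: gt) cart i 0 := by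
              rw [List.getElem?_eq_none_iff] at hnone; omega
            simp only [List.length_cons] at hbound hrlt
            omega
          · have hcir : i + pvInnerA (c0 :: gt) cart i 0 < cart.length :=
              (List.getElem?_eq_some_iff.mp hcx).1
            have h2 : pvInnerA (c0 :: gt) cart i 0 < (cart.drop i).length := by
              simp only [List.length_drop]; omega
            have := hall _ hrlt h2
            rw [List.getElem?_eq_getElem hrlt] at hgc
            rw [List.getElem?_eq_getElem hcir] at hcx
            have hst : (cart.drop i)[pvInnerA (c0 :: gt) cart i 0] =
                cart[i + pvInnerA (c0 :: gt) cart i 0] := by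
              simp [List.getElem_drop]
            rw [hst] at this
            cases hgc; cases hcx
            rw [hwf] at this
            exact Bool.false_ne_true this
        have hrun' : ∀ p, i + 1 ≤ p → p < cart.length → pvRun (c0 :: gt) cart p →
            ∃ q, i + 1 ≤ q ∧ q < p ∧ pvFull (c0 :: gt) cart q := by
          intro p hp1 hp2 hr
          obtain ⟨q, hq1, hq2, hqf⟩ := hrun p (by omega) hp2 hr
          rcases Nat.eq_or_lt_of_le hq1 with heq | hlt
          · exact absurd (heq ▸ hqf) hnotfull
          · exact ⟨q, by omega, hq2, hqf⟩
        have hstep : (pvFind (c0 :: gt) cart i = pvFind (c0 :: gt) cart (i + 1)) ∨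
            (pvFind (c0 :: gt) cart i = none ∧ pvFind (c0 :: gt) cart (i + 1) = none) := by
          rcases hr4 hrlt with hnone | ⟨c, x, hgc, hcx, hwf⟩
          · -- a wildcard run at i: hrun yields a full match in [i, i), absurd
            exfalso
            have hrn : cart.length ≤ i + pvInnerA (c0 :: gt) cart i 0 := by
              rw [List.getElem?_eq_none_iff] at hnone; omega
            have hruni : pvRun (c0 :: gt) cart i := by
              refine ⟨by simp only [List.length_cons] at hrlt ⊢; omega, ?_⟩
              rw [zip_all_iff]
              intro t h1 h2
              have h2' : t < cart.length - i := by simpa using h2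
              obtain ⟨c, x, hgc, hcx, hwt⟩ := hr3 t (Nat.zero_le t) (by omega)
              rw [List.getElem?_eq_getElem h1] at hgc
              have hct : i + t < cart.length := by omega
              rw [List.getElem?_eq_getElem hct] at hcx
              have hst : (cart.drop i)[t] = cart[i + t] := by simp [List.getElem_drop]
              simp only [hst]
              cases hgc; cases hcx
              exact hwt
            obtain ⟨q, hq1, hq2, _⟩ := hrun i (le_refl i) hi hruni
            omega
          · -- a genuine mismatch at index r, inside the cart
            have hcir : i + pvInnerA (c0 :: gt) cart i 0 < cart.length :=
              (List.getElem?_eq_some_iff.mp hcx).1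
            by_cases hik : i + (c0 :: gt).length ≤ cart.length
            · left
              have hmf : pvMatchAt (c0 :: gt) cart i = false := by
                rcases hMT : pvMatchAt (c0 :: gt) cart i with _ | _
                · rfl
                · exfalso
                  exact hnotfull ⟨hik, (matchAt_iff_all _ _ _ hik).mp hMT⟩
              simp only [List.length_cons] at hik; rw [pvFind]; simp [hik, hmf]
            · right
              exact ⟨pvFind_none_of_big _ _ _ (by omega), pvFind_none_of_big _ _ _ (by omega)⟩
        have hL : pvLoopA ((c0 :: gt) :: rest) cart i =
            pvLoopA ((c0 :: gt) :: rest) cart (i + 1) := by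
          simp only [List.length_cons] at hfull; rw [pvLoopA]; simp [hi, hb, hfull]
        rw [hL, ih (i + 1) (by omega) hrun']
        rcases hstep with he | ⟨h0, h1⟩
        · rw [he]
        · rw [h0, h1]
    · -- first-element check fails
      have hnotfull : ¬ pvFull (c0 :: gt) cart i := by
        rintro ⟨hbound, hall⟩
        rw [zip_all_iff] at hall
        have h2 : 0 < (cart.drop i).length := by simp only [List.length_drop]; omega
        have := hall 0 (by simp) h2
        have hst : (cart.drop i)[0] = cart[i] := by simp [List.getElem_drop]
        rw [hst] at this
        simp only [List.getElem_cons_zero] at this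
        exact hb this
      have hrun' : ∀ p, i + 1 ≤ p → p < cart.length → pvRun (c0 :: gt) cart p →
          ∃ q, i + 1 ≤ q ∧ q < p ∧ pvFull (c0 :: gt) cart q := by
        intro p hp1 hp2 hr
        obtain ⟨q, hq1, hq2, hqf⟩ := hrun p (by omega) hp2 hr
        rcases Nat.eq_or_lt_of_le hq1 with heq | hlt
        · exact absurd (heq ▸ hqf) hnotfull
        · exact ⟨q, by omega, hq2, hqf⟩
      have hstep : (pvFind (c0 :: gt) cart i = pvFind (c0 :: gt) cart (i + 1)) ∨
          (pvFind (c0 :: gt) cart i = none ∧ pvFind (c0 :: gt) cart (i + 1) = none) := by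
        by_cases hik : i + (c0 :: gt).length ≤ cart.length
        · left
          have hmf : pvMatchAt (c0 :: gt) cart i = false := by
            rcases hMT : pvMatchAt (c0 :: gt) cart i with _ | _
            · rfl
            · exact absurd ⟨hik, (matchAt_iff_all _ _ _ hik).mp hMT⟩ hnotfull
          simp only [List.length_cons] at hik; rw [pvFind]; simp [hik, hmf]
        · right
          exact ⟨pvFind_none_of_big _ _ _ (by omega), pvFind_none_of_big _ _ _ (by omega)⟩
      have hL : pvLoopA ((c0 :: gt) :: rest) cart i =
          pvLoopA ((c0 :: gt) :: rest) cart (i + 1) := by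
        rw [pvLoopA]; simp [hi, hb]
      rw [hL, ih (i + 1) (by omega) hrun']
      rcases hstep with he | ⟨h0, h1⟩
      · rw [he]
      · rw [h0, h1]

-- proof-side twin of pvSearch without the infeasibility exit (used to relate the two ports)
def pvSearchNP (cart : List String) : List (List String) → Nat → Int
  | [], _ => 1
  | g :: rest, pos =>
    match pvFind g cart pos with
    | some p => pvSearchNP cart rest (p + g.length)
    | none => 0

lemma searchNP_zero (cart : List String) :
    ∀ gs : List (List String), ∀ pos, pos ≤ cart.length →
      (cart.length : Int) - (pos : Int) < ((gs.map List.length).sum : Int) →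
      pvSearchNP cart gs pos = 0 := by
  intro gs
  induction gs with
  | nil =>
    intro pos hpos hlt
    exfalso
    simp only [List.map_nil, List.sum_nil, Nat.cast_zero] at hlt
    omega
  | cons g rest ih =>
    intro pos hpos hlt
    rw [pvSearchNP]
    rcases hf : pvFind g cart pos with _ | p
    · rfl
    · obtain ⟨hpq, hqk⟩ := pvFind_some g cart (cart.length + 1) pos p (by omega) hf
      apply ih (p + g.length) (by omega)
      simp only [List.map_cons, List.sum_cons] at hlt ⊢
      push_cast at hlt ⊢
      omega

lemma search_eq_NP (cart : List String) :
    ∀ gs : List (List String), ∀ pos need, pos ≤ cart.length →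
      need = (gs.map List.length).sum →
      pvSearch cart gs pos need = pvSearchNP cart gs pos := by
  intro gs
  induction gs with
  | nil => intro pos need _ _; rw [pvSearch, pvSearchNP]
  | cons g rest ih =>
    intro pos need hpos hneed
    by_cases hinf : (need : Int) > (cart.length : Int) - (pos : Int)
    · rw [pvSearch, if_pos hinf]
      exact (searchNP_zero cart (g :: rest) pos hpos (by omega)).symm
    · rw [pvSearch, if_neg hinf, pvSearchNP]
      rcases hf : pvFind g cart pos with _ | p
      · rfl
      · obtain ⟨hpq, hqk⟩ := pvFind_some g cart (cart.length + 1) pos p (by omega) hf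
        apply ih (p + g.length) (need - g.length) (by omega)
        simp only [List.map_cons, List.sum_cons] at hneed
        omega

-- past the cart's end, B skips empty groups in place and rejects any remaining nonempty group
lemma searchNP_end (cart : List String) :
    ∀ gs : List (List String), ∀ pos, cart.length ≤ pos → (∃ g ∈ gs, g ≠ []) →
      pvSearchNP cart gs pos = 0 := by
  intro gs
  induction gs with
  | nil => rintro pos _ ⟨g, hg, _⟩; cases hg
  | cons g rest ih =>
    rintro pos hpos hex
    rw [pvSearchNP]
    rcases hf : pvFind g cart pos with _ | p
    · rfl
    · obtain ⟨hpq, hqk⟩ := pvFind_some g cart (cart.length + 1) pos p (by omega) hf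
      have hg0 : g.length = 0 := by omega
      have hgnil : g = [] := List.eq_nil_of_length_eq_zero hg0
      apply ih (p + g.length) (by omega)
      obtain ⟨g', hg', hgne⟩ := hex
      rcases List.mem_cons.mp hg' with rfl | hmem
      · exact absurd hgnil hgne
      · exact ⟨g', hmem, hgne⟩

/-- Along A's actual trajectory (captured exactly by `pvSafe`), A's loop equals B's greedy search. -/
lemma loop_eq_NP (cart : List String) :
    ∀ cl : List (List String), ∀ pos, pos ≤ cart.length →
      pvSafe cart cl pos = true → pvLoopA cl cart pos = pvSearchNP cart cl pos := by
  intro cl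
  induction cl with
  | nil => intro pos _ _; rw [pvLoopA, pvSearchNP]
  | cons g rest ih =>
    intro pos hpos hsafe
    rcases hg : g with _ | ⟨c0, gt⟩
    · subst hg
      rw [pvSafe, Bool.and_eq_true] at hsafe
      obtain ⟨hlen, hany⟩ := hsafe
      rw [decide_eq_true_eq] at hlen
      have hA : pvLoopA ([] :: rest) cart pos = 0 := by
        rw [pvLoopA]; simp [show ¬ pos < cart.length by omega]
      obtain ⟨g', hg', hgne⟩ := List.any_eq_true.mp hany
      rw [hA, searchNP_end cart ([] :: rest) pos hlen
        ⟨g', List.mem_cons_of_mem _ hg', by simpa using hgne⟩]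
    subst hg
    rw [pvSafe] at hsafe
    rw [Bool.and_eq_true] at hsafe
    obtain ⟨hrunB, hrecB⟩ := hsafe
    simp only [List.all_eq_true, List.mem_range] at hrunB hrecB
    have hrun : ∀ p, pos ≤ p → p < cart.length → pvRun (c0 :: gt) cart p →
        ∃ q, pos ≤ q ∧ q < p ∧ pvFull (c0 :: gt) cart q := by
      intro p hp1 hp2 hr
      have := hrunB p hp2
      rw [decide_eq_true hp1, (pvRunB_iff _ _ _).mpr hr] at this
      simp only [Bool.and_true, Bool.not_true, Bool.false_or, List.any_eq_true,
        List.mem_range, Bool.and_eq_true, decide_eq_true_eq] at this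
      obtain ⟨q, hqp, hsq, hqf⟩ := this
      exact ⟨q, hsq, hqp, (pvFullB_iff _ _ _).mp hqf⟩
    rw [scan_eq cart c0 gt rest cart.length pos (by omega) hrun]
    rcases hf : pvFind (c0 :: gt) cart pos with _ | p
    · rw [pvSearchNP, hf]
    · obtain ⟨hposp, hbound⟩ := pvFind_some (c0 :: gt) cart (cart.length + 1) pos p (by omega) hf
      have hplt : p < cart.length + 1 := by
        simp only [List.length_cons] at hbound; omega
      have hff := pvFind_firstFullB (c0 :: gt) cart pos p hf
      have hrec := hrecB p hplt
      rw [hff] at hrec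
      simp only [Bool.not_true, Bool.false_or] at hrec
      rw [pvSearchNP, hf]
      exact ih (p + (c0 :: gt).length) (by omega) hrec

-- ===== VERDICT (by name: the statement is the Claim_ definition above) =====
theorem fresh_promotion_spec : Claim_equal_fresh_promotion := by
  intro codelist shopping_cart _ hsafe
  show fresh_promotion codelist shopping_cart = fresh_promotion_alt codelist shopping_cart
  show pvLoopA codelist shopping_cart 0 = pvSearch shopping_cart codelist 0 _
  rw [loop_eq_NP shopping_cart codelist 0 (Nat.zero_le _) hsafe,
    search_eq_NP shopping_cart codelist 0 _ (Nat.zero_le _) rfl]
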